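-- pv_equiv track=rewrite | github.com/kenny132652/lex-yacc | code.py | find_top_prio
-- ===== SOURCE A (Python) =====
-- prio_dict={'-':1,'+':2,'*':3,'/':4,'^':5,'$':6}#括弧是loop,$是開根號,^是冪次,[]是if
--
-- def find_top_prio(lst):
--     top_prio=1
--     count_ops=0
--
--     for ops in lst:
--
--         if ops in prio_dict:
--             count_ops +=1
--
--             if prio_dict[ops]>1:
--                 top_prio=prio_dict[ops]
--
--     return top_prio,count_ops
-- ===== SOURCE B (Python) =====
-- prio_dict={'-':1,'+':2,'*':3,'/':4,'^':5,'$':6}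
--
-- def find_top_prio(lst):
--     count_ops = sum(1 for x in lst if x in prio_dict)
--     top_prio = next((prio_dict[x] for x in reversed(lst) if prio_dict.get(x, 1) > 1), 1)
--     return top_prio, count_ops
-- ===== Notes on version B (the rewrite author's own statement) =====
-- stated objective: alternative
-- what changed: Replaces the single accumulator loop with two independent passes: a generator-sum counts operators, and a reversed-scan with next() picks the first (i.e. last-in-order) operator of priority > 1, defaulting to 1.
import Mathlib
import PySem

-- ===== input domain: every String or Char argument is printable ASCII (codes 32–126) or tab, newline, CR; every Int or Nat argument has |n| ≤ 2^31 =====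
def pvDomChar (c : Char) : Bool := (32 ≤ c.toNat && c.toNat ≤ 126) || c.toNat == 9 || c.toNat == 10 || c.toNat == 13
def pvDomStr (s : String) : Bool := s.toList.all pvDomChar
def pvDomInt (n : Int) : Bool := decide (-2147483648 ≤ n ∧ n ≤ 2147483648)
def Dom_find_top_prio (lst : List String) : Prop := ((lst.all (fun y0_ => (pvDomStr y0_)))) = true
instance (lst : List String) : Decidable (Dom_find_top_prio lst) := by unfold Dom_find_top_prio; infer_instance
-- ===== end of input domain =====

-- B computes the same pair by a different decomposition: two independent passes (a count, and a
-- reversed-order scan for the first priority > 1) instead of A's single accumulator loop.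

-- the module-level dict prio_dict, as a PySem.Dict (insertion order, distinct keys)
def prioDict : PySem.Dict String Int :=
  PySem.Dict.ofList [("-", 1), ("+", 2), ("*", 3), ("/", 4), ("^", 5), ("$", 6)]

-- ===== PORT A =====
-- literal transliteration of A's single loop carrying (top_prio, count_ops)
def find_top_prio (lst : List String) : Int × Int :=
  let r := lst.foldl
    (fun (st : Int × Int) ops =>
      if prioDict.contains ops then
        let c := st.2 + 1
        if prioDict.getD ops 0 > 1 then (prioDict.getD ops 0, c) else (st.1, c)
      else st)
    (1, 0)
  (r.1, r.2)

-- ===== PORT B =====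
-- next((prio_dict[x] for x in reversed(lst) if prio_dict.get(x,1) > 1), 1)
def firstHigh : List String → Int
  | [] => 1
  | x :: xs => if prioDict.getD x 1 > 1 then prioDict.getD x 1 else firstHigh xs

def find_top_prio_alt (lst : List String) : Int × Int :=
  let count_ops : Int := Int.ofNat (lst.countP (fun x => prioDict.contains x))
  let top_prio : Int := firstHigh lst.reverse
  (top_prio, count_ops)

-- ===== PRECONDITION & SPEC =====
def Spec_find_top_prio (lst : List String) (out : Int × Int) : Prop := out = find_top_prio_alt lst
instance (lst : List String) (out : Int × Int) : Decidable (Spec_find_top_prio lst out) := by unfold Spec_find_top_prio; infer_instance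

-- ===== CLAIM (what is proved, stated in full; the proofs are below) =====
def Claim_equal_find_top_prio : Prop := ∀ (lst : List String), Dom_find_top_prio lst → Spec_find_top_prio lst (find_top_prio lst)

-- ===== LEMMAS AND PROOFS =====

-- A's top_prio accumulator, isolated (front recursion with accumulator)
def lastHigh : List String → Int → Int
  | [], t => t
  | x :: xs, t => lastHigh xs (if prioDict.getD x 1 > 1 then prioDict.getD x 1 else t)

-- B's reversed scan, generalized over the default
def firstHighD : List String → Int → Int
  | [], t => t
  | x :: xs, t => if prioDict.getD x 1 > 1 then prioDict.getD x 1 else firstHighD xs t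

lemma contains_imp_getD (x : String) (h : prioDict.contains x = true) :
    prioDict.getD x 0 = prioDict.getD x 1 := by
  have e : prioDict = PySem.Dict.mk [("-", 1), ("+", 2), ("*", 3), ("/", 4), ("^", 5), ("$", 6)] := by
    decide
  rw [e] at h ⊢
  simp [PySem.Dict.getD_eq_get?_getD, PySem.Dict.get?_mk_cons, PySem.Dict.contains_mk] at h ⊢
  split_ifs <;> simp_all

lemma not_contains_getD (x : String) (h : prioDict.contains x = false) :
    prioDict.getD x 1 = 1 := by
  have e : prioDict = PySem.Dict.mk [("-", 1), ("+", 2), ("*", 3), ("/", 4), ("^", 5), ("$", 6)] := by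
    decide
  rw [e] at h ⊢
  simp [PySem.Dict.getD_eq_get?_getD, PySem.Dict.get?_mk_cons, PySem.Dict.contains_mk] at h ⊢
  split_ifs <;> simp_all [PySem.Dict.get?]

lemma foldA_eq (l : List String) (t c : Int) :
    l.foldl
      (fun (st : Int × Int) ops =>
        if prioDict.contains ops then
          let c := st.2 + 1
          if prioDict.getD ops 0 > 1 then (prioDict.getD ops 0, c) else (st.1, c)
        else st)
      (t, c)
    = (lastHigh l t, c + Int.ofNat (l.countP (fun x => prioDict.contains x))) := by
  induction l generalizing t c with
  | nil => simp [lastHigh]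
  | cons x xs ih =>
    simp only [List.foldl_cons, List.countP_cons, lastHigh]
    by_cases hx : prioDict.contains x = true
    · rw [contains_imp_getD x hx] at *
      simp only [hx, if_true]
      split_ifs with hp
      · rw [ih]; simp; ring
      · rw [ih]; simp; ring
    · simp only [Bool.not_eq_true] at hx
      rw [not_contains_getD x hx]
      simp [hx, ih]

lemma firstHighD_append (l : List String) (x : String) (t : Int) :
    firstHighD (l ++ [x]) t
      = firstHighD l (if prioDict.getD x 1 > 1 then prioDict.getD x 1 else t) := by
  induction l generalizing t with
  | nil => simp [firstHighD]
  | cons y ys ih => simp [firstHighD, ih]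

lemma lastHigh_eq_firstHighD (l : List String) (t : Int) :
    lastHigh l t = firstHighD l.reverse t := by
  induction l generalizing t with
  | nil => simp [lastHigh, firstHighD]
  | cons x xs ih =>
    simp only [lastHigh, List.reverse_cons, firstHighD_append, ih]

lemma firstHigh_eq_firstHighD (l : List String) : firstHigh l = firstHighD l 1 := by
  induction l with
  | nil => rfl
  | cons x xs ih => simp [firstHigh, firstHighD, ih]

-- ===== VERDICT (by name: the statement is the Claim_ definition above) =====
theorem find_top_prio_spec : Claim_equal_find_top_prio := by
  intro lst _
  unfold Spec_find_top_prio find_top_prio find_top_prio_alt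
  rw [foldA_eq, lastHigh_eq_firstHighD, firstHigh_eq_firstHighD]
  simp
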